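-- pv_equiv track=rewrite | github.com/Bryan-13-TY/Mis-programas | Programas en Python/Teoria de la computación/Practica 1/Operaciones_Cadenas.py | Prefijo
-- ===== SOURCE A (Python) =====
-- def Prefijo(Cadena_W1,Cadena_W2):
--     Prefijos_W2 = []
--     Prefijo_W2 = ""
--     Long_Cadena_W2 = len(Cadena_W2)
--     i = 0
--
--     #Se obtiene el prefijo correspondiente
--     while i < Long_Cadena_W2:
--         for j in range(0,i + 1):
--             Prefijo_W2 = Prefijo_W2 + Cadena_W2[j]
--         i += 1
--
--         Prefijos_W2.append(Prefijo_W2) #Agrega el Prefijo_W2 a Prefijos_W2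
--         Prefijo_W2 = "" #Se establece el valor inicial del Prefijo_W2
--     Prefijos_W2.insert(0,"λ") #Se le agrega el elemento Lambda
--
--     #Verificar si Cadena_W1 es prefijo de Cadena_W2
--     return Cadena_W1 in Prefijos_W2,Prefijos_W2
-- ===== SOURCE B (Python) =====
-- def Prefijo(Cadena_W1, Cadena_W2):
--     prefijos = ["λ"]
--     acc = ""
--     for c in Cadena_W2:
--         acc += c
--         prefijos.append(acc)
--     return Cadena_W1 in prefijos, prefijos
-- ===== Notes on version B (the rewrite author's own statement) =====
-- stated objective: faster
-- what changed: Single pass over W2 accumulating each prefix incrementally instead of a nested loop that rebuilds every prefix character-by-character from scratch.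
import Mathlib
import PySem

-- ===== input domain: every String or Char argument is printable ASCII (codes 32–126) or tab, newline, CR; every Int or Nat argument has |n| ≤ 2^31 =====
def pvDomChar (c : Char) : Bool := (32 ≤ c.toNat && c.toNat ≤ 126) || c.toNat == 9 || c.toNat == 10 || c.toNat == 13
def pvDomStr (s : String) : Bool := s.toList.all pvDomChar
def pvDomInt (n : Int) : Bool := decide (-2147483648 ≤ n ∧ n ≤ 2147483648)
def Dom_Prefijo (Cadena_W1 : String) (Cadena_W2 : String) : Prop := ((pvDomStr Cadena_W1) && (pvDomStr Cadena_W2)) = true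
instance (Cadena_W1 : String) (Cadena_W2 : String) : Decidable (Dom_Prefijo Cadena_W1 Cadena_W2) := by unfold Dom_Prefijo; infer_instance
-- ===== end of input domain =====

-- B replaces A's nested prefix-rebuilding loops by one incremental pass (objective: faster, constant-factor).

-- ===== PORT A =====
-- A: for each i < len(W2), rebuild the (i+1)-prefix by an inner loop over j in range(0,i+1),
-- append it, then prepend "λ". Indexing Cadena_W2[j] is always in range here; ported as getD.
def Prefijo (Cadena_W1 : String) (Cadena_W2 : String) : Bool × List String :=
  let l := Cadena_W2.toList
  let Long_Cadena_W2 := l.length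
  let Prefijos_W2 :=
    (List.range Long_Cadena_W2).foldl
      (fun (acc : List String) (i : Nat) =>
        let Prefijo_W2 :=
          (List.range (i + 1)).foldl (fun (s : List Char) (j : Nat) => s ++ [l.getD j ' ']) []
        acc ++ [String.mk Prefijo_W2])
      []
  let Prefijos_W2 := "λ" :: Prefijos_W2
  (Prefijos_W2.contains Cadena_W1, Prefijos_W2)

-- ===== PORT B =====
-- B: one pass over the characters of W2, growing the accumulator and appending it each step.
def Prefijo_alt (Cadena_W1 : String) (Cadena_W2 : String) : Bool × List String :=
  let st :=
    Cadena_W2.toList.foldl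
      (fun (p : List String × List Char) (c : Char) =>
        let acc := p.2 ++ [c]
        (p.1 ++ [String.mk acc], acc))
      (["λ"], [])
  (st.1.contains Cadena_W1, st.1)

-- ===== PRECONDITION & SPEC =====
def Spec_Prefijo (Cadena_W1 : String) (Cadena_W2 : String) (out : Bool × List String) : Prop := out = Prefijo_alt Cadena_W1 Cadena_W2
instance (Cadena_W1 : String) (Cadena_W2 : String) (out : Bool × List String) : Decidable (Spec_Prefijo Cadena_W1 Cadena_W2 out) := by unfold Spec_Prefijo; infer_instance

-- ===== CLAIM (what is proved, stated in full; the proofs are below) =====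
def Claim_equal_Prefijo : Prop := ∀ (Cadena_W1 : String) (Cadena_W2 : String), Dom_Prefijo Cadena_W1 Cadena_W2 → Spec_Prefijo Cadena_W1 Cadena_W2 (Prefijo Cadena_W1 Cadena_W2)

-- ===== LEMMAS AND PROOFS =====

-- A's inner loop over range(i+1) builds exactly the map of getD over the indices.
theorem foldl_snoc_range {α : Type} (f : Nat → α) :
    ∀ (m : Nat) (s : List α),
      (List.range m).foldl (fun acc j => acc ++ [f j]) s = s ++ (List.range m).map f := by
  intro m
  induction m with
  | zero => intro s; simp
  | succ k ih =>
    intro s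
    simp [List.range_succ, List.foldl_append, ih]

-- mapping getD over range m is take m, for m ≤ length
theorem map_getD_range_eq_take (l : List Char) :
    ∀ (m : Nat), m ≤ l.length → (List.range m).map (fun j => l.getD j ' ') = l.take m := by
  intro m
  induction m with
  | zero => simp
  | succ k ih =>
    intro h
    have hk : k ≤ l.length := Nat.le_of_succ_le h
    have hkl : k < l.length := h
    rw [List.range_succ, List.map_append, ih hk, List.take_succ]
    simp [List.getD, List.getElem?_eq_getElem hkl]

-- B's fold, characterized: starting from (pref, acc) and folding over l,
-- the first component gains the prefixes acc ++ take (i+1) l.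
theorem alt_fold_char :
    ∀ (l : List Char) (pref : List String) (acc : List Char),
      (l.foldl (fun (p : List String × List Char) (c : Char) =>
          (p.1 ++ [String.mk (p.2 ++ [c])], p.2 ++ [c])) (pref, acc))
        = (pref ++ (List.range l.length).map (fun i => String.mk (acc ++ l.take (i + 1))),
           acc ++ l) := by
  intro l
  induction l with
  | nil => intro pref acc; simp
  | cons c t ih =>
    intro pref acc
    simp only [List.foldl_cons, ih, List.length_cons]
    simp [List.range_succ_eq_map, List.map_map, Function.comp, List.append_assoc]

-- both ports produce the same list of prefixes
theorem lists_eq (w2 : String) : (Prefijo "" w2).2 = (Prefijo_alt "" w2).2 := by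
  simp only [Prefijo, Prefijo_alt, alt_fold_char]
  congr 1
  rw [foldl_snoc_range (fun i => String.mk ((List.range (i+1)).foldl
    (fun s j => s ++ [w2.toList.getD j ' ']) []))]
  simp only [List.nil_append]
  apply List.map_congr_left
  intro i hi
  have : i < w2.toList.length := List.mem_range.mp hi
  rw [foldl_snoc_range, map_getD_range_eq_take w2.toList (i+1) this]
  simp

-- ===== VERDICT (by name: the statement is the Claim_ definition above) =====
theorem Prefijo_spec : Claim_equal_Prefijo := by
  intro w1 w2 _
  unfold Spec_Prefijo
  have h := lists_eq w2
  simp only [Prefijo, Prefijo_alt] at h ⊢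
  rw [h]
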